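-- pv_equiv track=rewrite | github.com/afloren/neurometrics | neurometrics/axcodes.py | axcodes2ornt
-- ===== SOURCE A (Python) =====
-- def axcodes2ornt(labels1,labels2):
--     ornt = []
--     for l1 in labels1:
--         found = False
--         for i,l2 in enumerate(labels2):
--             if set(l1) == set(l2):
--                 flip = 1 if (l1[0] == l2[0]) else -1
--                 ornt.append((i,flip))
--                 found = True
--                 break
--         if not found:
--             raise Error('no matching label sets for %s'.format(l1))
--     return ornt
-- ===== SOURCE B (Python) =====
-- def axcodes2ornt(labels1, labels2):
--     # Build once: canonical character-set key -> (earliest index, first char).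
--     index = {}
--     for i, l2 in enumerate(labels2):
--         if l2:
--             key = ''.join(sorted(set(l2)))
--             if key not in index:
--                 index[key] = (i, l2[0])
--     out = []
--     for l1 in labels1:
--         i, c = index[''.join(sorted(set(l1)))]
--         out.append((i, 1 if l1[0] == c else -1))
--     return out
-- ===== Notes on version B (the rewrite author's own statement) =====
-- stated objective: faster
-- what changed: B builds a dictionary from canonical character-set key (''.join(sorted(set(l2)))) to (earliest index, first char) in one pass over labels2, then answers each label1 by a single lookup, replacing A's per-label linear scan with set() comparisons.
import Mathlib
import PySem

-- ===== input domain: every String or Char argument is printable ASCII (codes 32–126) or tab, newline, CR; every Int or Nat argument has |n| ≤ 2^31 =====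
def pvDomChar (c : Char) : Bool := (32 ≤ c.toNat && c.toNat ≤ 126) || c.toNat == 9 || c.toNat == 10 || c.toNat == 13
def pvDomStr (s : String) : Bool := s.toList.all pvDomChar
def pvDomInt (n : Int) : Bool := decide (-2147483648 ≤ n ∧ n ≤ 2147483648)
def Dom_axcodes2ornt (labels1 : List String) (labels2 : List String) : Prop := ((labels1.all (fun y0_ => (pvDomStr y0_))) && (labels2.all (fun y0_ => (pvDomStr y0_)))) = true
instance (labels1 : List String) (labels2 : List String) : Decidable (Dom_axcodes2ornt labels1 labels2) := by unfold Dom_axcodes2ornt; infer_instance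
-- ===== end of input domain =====

-- B replaces A's per-label linear scan over labels2 by a dictionary, built once,
-- from the canonical character-set key to (earliest index, first char): objective 'faster'.

-- ===== PORT A =====
-- inner loop 'for i,l2 in enumerate(labels2): …' of A; none = the raise / IndexError path
def pvFindA (c1s : List Char) (c1? : Option Char) : List (Int × String) → Option (Int × Int)
  | [] => none
  | (i, l2) :: rest =>
    if PySem.Set.equal (PySem.Set.ofList c1s) (PySem.Set.ofList l2.toList) then
      match c1?, PySem.Str.pyGet? l2 0 with
      | some a, some b => some (i, if a = b then (1 : Int) else -1)
      | _, _ => none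
    else pvFindA c1s c1? rest

-- outer loop of A, building ornt; none = some label had no match (A raises)
def pvLoopA (l2e : List (Int × String)) : List String → Option (List (Int × Int))
  | [] => some []
  | l1 :: rest =>
    match pvFindA l1.toList (PySem.Str.pyGet? l1 0) l2e with
    | none => none
    | some p => (pvLoopA l2e rest).map (p :: ·)

def axcodes2ornt (labels1 : List String) (labels2 : List String) : List (Int × Int) :=
  (pvLoopA (PySem.List.enumerate labels2) labels1).getD []

-- ===== PORT B =====
-- ''.join(sorted(set(s)))
def pvCanon (s : String) : String :=
  String.ofList (PySem.List.sorted (PySem.Set.ofList s.toList) (fun c => c) false)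

-- B's first loop: index = {}; for i,l2 in enumerate(labels2): if l2 and key not in index: index[key] = (i, l2[0])
def pvBuildIdx (d : PySem.Dict String (Int × Char)) : List (Int × String) → PySem.Dict String (Int × Char)
  | [] => d
  | (i, l2) :: rest =>
    match l2.toList with
    | [] => pvBuildIdx d rest
    | c :: _ =>
      if d.contains (pvCanon l2) then pvBuildIdx d rest
      else pvBuildIdx (d.insert (pvCanon l2) (i, c)) rest

-- B's second loop; none = KeyError / IndexError path of B
def pvLoopB (d : PySem.Dict String (Int × Char)) : List String → Option (List (Int × Int))
  | [] => some []
  | l1 :: rest =>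
    match d.get? (pvCanon l1), l1.toList with
    | some (i, c), a :: _ => (pvLoopB d rest).map ((i, if a = c then (1 : Int) else -1) :: ·)
    | _, _ => none

def axcodes2ornt_alt (labels1 : List String) (labels2 : List String) : List (Int × Int) :=
  (pvLoopB (pvBuildIdx PySem.Dict.empty (PySem.List.enumerate labels2)) labels1).getD []

-- ===== PRECONDITION & SPEC =====
-- Pre_ excludes exactly the inputs where A raises: a label1 with no character-set match
-- in labels2 (A's 'raise Error(…)', itself a NameError) and an empty label1 whose match
-- is the empty string (l1[0] IndexError).
def Pre_axcodes2ornt (labels1 : List String) (labels2 : List String) : Prop :=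
  ∀ l1 ∈ labels1, l1 ≠ "" ∧ ∃ l2 ∈ labels2,
    PySem.Set.equal (PySem.Set.ofList l1.toList) (PySem.Set.ofList l2.toList) = true

instance (labels1 : List String) (labels2 : List String) : Decidable (Pre_axcodes2ornt labels1 labels2) := by
  unfold Pre_axcodes2ornt; infer_instance

def pvWitness_axcodes2ornt : List String × List String := (["RL", "AP"], ["LR", "PA", "SI"])

def Spec_axcodes2ornt (labels1 : List String) (labels2 : List String) (out : List (Int × Int)) : Prop := out = axcodes2ornt_alt labels1 labels2
instance (labels1 : List String) (labels2 : List String) (out : List (Int × Int)) : Decidable (Spec_axcodes2ornt labels1 labels2 out) := by unfold Spec_axcodes2ornt; infer_instance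

-- ===== CLAIM (what is proved, stated in full; the proofs are below) =====
def Claim_equal_axcodes2ornt : Prop := ∀ (labels1 : List String) (labels2 : List String), Dom_axcodes2ornt labels1 labels2 → Pre_axcodes2ornt labels1 labels2 → Spec_axcodes2ornt labels1 labels2 (axcodes2ornt labels1 labels2)

-- ===== LEMMAS AND PROOFS =====

-- set(l1) == set(l2) iff the canonical keys coincide
theorem pvEqual_iff_canon (a b : String) :
    PySem.Set.equal (PySem.Set.ofList a.toList) (PySem.Set.ofList b.toList) = true ↔
      pvCanon a = pvCanon b := by
  rw [PySem.Set.equal_iff]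
  unfold pvCanon
  constructor
  · intro h
    have hperm : (PySem.Set.ofList a.toList).Perm (PySem.Set.ofList b.toList) := by
      rw [List.perm_ext_iff_of_nodup (PySem.Set.nodup_ofList _) (PySem.Set.nodup_ofList _)]
      exact h
    exact congrArg String.ofList ((PySem.List.sorted_id_eq_sorted_id_iff_perm _ _).2 hperm)
  · intro h x
    have h2 : (PySem.List.sorted (PySem.Set.ofList a.toList) (fun x => x) false) =
        (PySem.List.sorted (PySem.Set.ofList b.toList) (fun x => x) false) := by
      have := congrArg String.toList h; simpa using this
    have hperm := (PySem.List.sorted_id_eq_sorted_id_iff_perm _ _).1 h2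
    constructor
    · exact fun hx => hperm.mem_iff.1 hx
    · exact fun hx => hperm.mem_iff.2 hx

-- set equality with nonempty a forces b nonempty
theorem pvEqual_ne_nil {a b : String}
    (h : PySem.Set.equal (PySem.Set.ofList a.toList) (PySem.Set.ofList b.toList) = true)
    (ha : a.toList ≠ []) : b.toList ≠ [] := by
  rw [PySem.Set.equal_iff] at h
  intro hb
  rcases List.exists_mem_of_ne_nil _ ha with ⟨x, hx⟩
  have : x ∈ PySem.Set.ofList b.toList := (h x).1 ((PySem.Set.mem_ofList _ _).2 hx)
  rw [hb] at this
  simp [PySem.Set.ofList] at this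

-- first (index, first char) whose label has canonical key k (and is nonempty)
def pvFirst (k : String) : List (Int × String) → Option (Int × Char)
  | [] => none
  | (i, l2) :: rest =>
    match l2.toList with
    | [] => pvFirst k rest
    | c :: _ => if pvCanon l2 = k then some (i, c) else pvFirst k rest

theorem pvBuildIdx_get? (k : String) (d : PySem.Dict String (Int × Char))
    (xs : List (Int × String)) :
    (pvBuildIdx d xs).get? k =
      match d.get? k with
      | some v => some v
      | none => pvFirst k xs := by
  induction xs generalizing d with
  | nil => cases hd : d.get? k <;> simp [pvBuildIdx, pvFirst, hd]
  | cons p rest ih =>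
    obtain ⟨i, l2⟩ := p
    cases hl : l2.toList with
    | nil => simp only [pvBuildIdx, hl, pvFirst]; exact ih d
    | cons c t =>
      simp only [pvBuildIdx, hl, pvFirst]
      by_cases hc : d.contains (pvCanon l2)
      · rw [if_pos hc]
        rw [ih d]
        cases hd : d.get? k with
        | some v => rfl
        | none =>
          have hne : ¬ (pvCanon l2 = k) := by
            intro he
            rw [he] at hc
            rw [PySem.Dict.contains_eq_isSome_get?, hd] at hc
            simp at hc
          simp [hne]
      · rw [if_neg hc]
        rw [ih (d.insert (pvCanon l2) (i, c))]
        by_cases he : pvCanon l2 = k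
        · subst he
          have hd : d.get? (pvCanon l2) = none := by
            rw [PySem.Dict.contains_eq_isSome_get?] at hc
            cases hd : d.get? (pvCanon l2) <;> simp [hd] at hc ⊢
          simp [PySem.Dict.get?_insert_self, hd]
        · rw [PySem.Dict.get?_insert_of_ne _ _ (fun h => he h.symm)]
          cases hd : d.get? k
          · simp [he]
          · simp

theorem pvFindA_eq_first (l1 : String) (a : Char) (t : List Char) (h : l1.toList = a :: t)
    (xs : List (Int × String)) :
    pvFindA l1.toList (PySem.Str.pyGet? l1 0) xs =
      (pvFirst (pvCanon l1) xs).map (fun p => (p.1, if a = p.2 then (1 : Int) else -1)) := by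
  induction xs with
  | nil => simp [pvFindA, pvFirst]
  | cons p rest ih =>
    obtain ⟨i, l2⟩ := p
    by_cases heq : PySem.Set.equal (PySem.Set.ofList l1.toList) (PySem.Set.ofList l2.toList) = true
    · have hcanon : pvCanon l2 = pvCanon l1 := ((pvEqual_iff_canon l1 l2).1 heq).symm
      have hl2 : l2.toList ≠ [] := pvEqual_ne_nil heq (by rw [h]; simp)
      cases hl : l2.toList with
      | nil => exact absurd hl hl2
      | cons c t2 =>
        have hg1 : PySem.Str.pyGet? l1 0 = some a := by
          rw [show (0 : Int) = ((0 : Nat) : Int) by rfl, PySem.Str.pyGet?_natCast, h]; rfl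
        have hg2 : PySem.Str.pyGet? l2 0 = some c := by
          rw [show (0 : Int) = ((0 : Nat) : Int) by rfl, PySem.Str.pyGet?_natCast, hl]; rfl
        simp only [pvFindA]
        rw [if_pos heq, hg1, hg2]
        simp only [pvFirst, hl, hcanon, if_pos]
        rfl
    · have hcanon : ¬ (pvCanon l2 = pvCanon l1) := by
        intro he
        exact heq ((pvEqual_iff_canon l1 l2).2 he.symm)
      simp only [pvFindA]
      rw [if_neg heq]
      cases hl : l2.toList with
      | nil => simp only [pvFirst, hl]; exact ih
      | cons c t2 =>
        simp only [pvFirst, hl]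
        rw [if_neg hcanon]
        exact ih

theorem pvFirst_isSome {l1 l2 : String} (labels2 : List String) (h2 : l2 ∈ labels2)
    (h : PySem.Set.equal (PySem.Set.ofList l1.toList) (PySem.Set.ofList l2.toList) = true)
    (h1 : l1.toList ≠ []) (s : Int) :
    (pvFirst (pvCanon l1) (PySem.List.enumerate labels2 s)).isSome := by
  induction labels2 generalizing s with
  | nil => simp at h2
  | cons x rest ih =>
    rw [PySem.List.enumerate_cons]
    cases hl : x.toList with
    | nil =>
      simp only [pvFirst, hl]
      rcases List.mem_cons.1 h2 with h2 | h2
      · exact absurd hl (pvEqual_ne_nil (h2 ▸ h) h1)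
      · exact ih h2 (s + 1)
    | cons c t =>
      simp only [pvFirst, hl]
      by_cases he : pvCanon x = pvCanon l1
      · simp [he]
      · simp only [he, if_false]
        rcases List.mem_cons.1 h2 with h2 | h2
        · exact absurd ((pvEqual_iff_canon l1 x).1 (h2 ▸ h)).symm he
        · exact ih h2 (s + 1)

theorem pvLoops_eq (labels1 labels2 : List String)
    (hp : Pre_axcodes2ornt labels1 labels2) :
    pvLoopA (PySem.List.enumerate labels2) labels1 =
      pvLoopB (pvBuildIdx PySem.Dict.empty (PySem.List.enumerate labels2)) labels1 := by
  induction labels1 with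
  | nil => rfl
  | cons l1 rest ih =>
    have hpre := hp l1 (List.mem_cons_self)
    obtain ⟨h1, l2, hl2, heq⟩ := hpre
    have h1' : l1.toList ≠ [] := by
      intro hn
      exact h1 (by
        have := congrArg String.ofList hn
        simpa using this)
    cases hl : l1.toList with
    | nil => exact absurd hl h1'
    | cons a t =>
      have hsome := pvFirst_isSome labels2 hl2 heq h1' 0
      cases hf : pvFirst (pvCanon l1) (PySem.List.enumerate labels2 0) with
      | none => rw [hf] at hsome; simp at hsome
      | some pc =>
        obtain ⟨i, c⟩ := pc
        have hA := pvFindA_eq_first l1 a t hl (PySem.List.enumerate labels2 0)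
        rw [hf] at hA
        have hB : (pvBuildIdx PySem.Dict.empty (PySem.List.enumerate labels2)).get? (pvCanon l1) = some (i, c) := by
          rw [pvBuildIdx_get?]
          simpa [PySem.Dict.get?_empty] using hf
        simp only [pvLoopA, pvLoopB]
        rw [hA, hB, hl, ih (fun x hx => hp x (List.mem_cons_of_mem _ hx))]
        rfl

-- ===== VERDICT (by name: the statement is the Claim_ definition above) =====
theorem axcodes2ornt_spec : Claim_equal_axcodes2ornt := by
  intro labels1 labels2 _ hp
  unfold Spec_axcodes2ornt axcodes2ornt axcodes2ornt_alt
  rw [pvLoops_eq labels1 labels2 hp]
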